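-- pv_equiv track=rewrite | github.com/anton-povarov/experimental | py/trigrams_exp.py | trigrams_split
-- ===== SOURCE A (Python) =====
-- def trigrams_split(s: str) -> list[str]:
--     res = []
--     wlist = s.split(" ")
--     offset = 0
--     for word in wlist:
--         res.extend([(word[x : x + 3], offset + x) for x in range(len(word) - 2)])
--         offset += len(word) + 1  # space
--
--     return res
-- ===== SOURCE B (Python) =====
-- def trigrams_split(s: str) -> list[str]:
--     # One pass over global character positions: a trigram of a word is exactly
--     # a space-free 3-char window of s, and its offset is the window's start index.
--     return [(s[i:i + 3], i) for i in range(len(s) - 2) if " " not in s[i:i + 3]]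
-- ===== Notes on version B (the rewrite author's own statement) =====
-- stated objective: simpler
-- what changed: B replaces A's split-into-words plus per-word inner loop with running offset by a single comprehension over global window start indices, keeping exactly the space-free 3-char windows.
import Mathlib
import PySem

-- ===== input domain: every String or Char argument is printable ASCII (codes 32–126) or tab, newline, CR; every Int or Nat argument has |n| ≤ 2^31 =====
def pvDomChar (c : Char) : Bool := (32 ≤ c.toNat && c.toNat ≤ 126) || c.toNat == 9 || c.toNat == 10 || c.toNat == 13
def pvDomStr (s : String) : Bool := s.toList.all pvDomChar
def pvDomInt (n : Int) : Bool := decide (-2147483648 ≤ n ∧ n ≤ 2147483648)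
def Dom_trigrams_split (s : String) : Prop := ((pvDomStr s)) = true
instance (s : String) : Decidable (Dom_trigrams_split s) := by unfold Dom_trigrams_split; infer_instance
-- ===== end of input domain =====

-- B scans global window start indices in one comprehension instead of A's word split with a running offset; objective: simpler (same O(n) cost).

-- ===== PORT A =====
def trigrams_split (s : String) : List (String × Int) :=
  let wlist := (PySem.Chars.splitOn s.toList [' ']).map String.ofList
  (wlist.foldl
    (fun (st : List (String × Int) × Int) word =>
      (st.1 ++ (PySem.List.pyRange 0 (PySem.Str.len word - 2) 1).map
          (fun x => (PySem.Str.slice word (some x) (some (x + 3)), st.2 + x)),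
       st.2 + PySem.Str.len word + 1))
    ([], 0)).1

-- ===== PORT B =====
def trigrams_split_alt (s : String) : List (String × Int) :=
  ((PySem.List.pyRange 0 (PySem.Str.len s - 2) 1).filter
      (fun i => !(PySem.Str.isIn " " (PySem.Str.slice s (some i) (some (i + 3)))))).map
    (fun i => (PySem.Str.slice s (some i) (some (i + 3)), i))

-- ===== PRECONDITION & SPEC =====
def Spec_trigrams_split (s : String) (out : List (String × Int)) : Prop := out = trigrams_split_alt s
instance (s : String) (out : List (String × Int)) : Decidable (Spec_trigrams_split s out) := by unfold Spec_trigrams_split; infer_instance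

-- ===== CLAIM (what is proved, stated in full; the proofs are below) =====
def Claim_equal_trigrams_split : Prop := ∀ (s : String), Dom_trigrams_split s → Spec_trigrams_split s (trigrams_split s)

-- ===== LEMMAS AND PROOFS =====

-- trigram list of one word, recursively over 3-char windows
def pvAtri : List Char → Int → List (String × Int)
  | a :: b :: c :: t, off => (String.ofList [a, b, c], off) :: pvAtri (b :: c :: t) (off + 1)
  | _, _ => []

-- B's scan as a recursion over the char list
def pvBscan : List Char → Int → List (String × Int)
  | a :: b :: c :: t, i =>
      (if ' ' ∈ [a, b, c] then [] else [(String.ofList [a, b, c], i)]) ++ pvBscan (b :: c :: t) (i + 1)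
  | _, _ => []

-- Python split(" ") as a clean structural recursion
def pvWsplit : List Char → List (List Char)
  | [] => [[]]
  | a :: rest =>
      if a = ' ' then [] :: pvWsplit rest
      else match pvWsplit rest with
           | w :: ws => (a :: w) :: ws
           | [] => [[a]]

def pvJoinSp : List (List Char) → List Char
  | [] => []
  | [w] => w
  | w :: ws => w ++ ' ' :: pvJoinSp ws

def pvAfold : List (List Char) → Int → List (String × Int)
  | [], _ => []
  | w :: ws, off => pvAtri w off ++ pvAfold ws (off + w.length + 1)

lemma pvWsplit_ne_nil (cs : List Char) : pvWsplit cs ≠ [] := by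
  induction cs with
  | nil => simp [pvWsplit]
  | cons a rest ih =>
    simp only [pvWsplit]
    split
    · simp
    · rcases h : pvWsplit rest with _ | ⟨w, ws⟩
      · exact absurd h ih
      · simp

lemma pvWsplit_nospace (cs : List Char) : ∀ w ∈ pvWsplit cs, ' ' ∉ w := by
  induction cs with
  | nil => simp [pvWsplit]
  | cons a rest ih =>
    obtain ⟨w0, ws, h⟩ : ∃ w0 ws, pvWsplit rest = w0 :: ws := by
      rcases e : pvWsplit rest with _ | ⟨w0, ws⟩
      · exact absurd e (pvWsplit_ne_nil rest)
      · exact ⟨_, _, rfl⟩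
    by_cases ha : a = ' '
    · subst ha
      simp only [pvWsplit, if_pos rfl]
      intro w hw
      rcases List.mem_cons.1 hw with h' | h'
      · subst h'; simp
      · exact ih w h'
    · simp only [pvWsplit, if_neg ha, h]
      intro w hw
      rcases List.mem_cons.1 hw with h' | h'
      · subst h'
        intro hm
        rcases List.mem_cons.1 hm with hm | hm
        · exact ha hm.symm
        · exact ih w0 (by rw [h]; exact List.mem_cons_self) hm
      · exact ih w (by rw [h]; exact List.mem_cons_of_mem _ h')

lemma pvJoinSp_pvWsplit (cs : List Char) : pvJoinSp (pvWsplit cs) = cs := by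
  induction cs with
  | nil => simp [pvWsplit, pvJoinSp]
  | cons a rest ih =>
    obtain ⟨w0, ws, h⟩ : ∃ w0 ws, pvWsplit rest = w0 :: ws := by
      rcases e : pvWsplit rest with _ | ⟨w0, ws⟩
      · exact absurd e (pvWsplit_ne_nil rest)
      · exact ⟨_, _, rfl⟩
    rw [h] at ih
    by_cases ha : a = ' '
    · subst ha
      simp only [pvWsplit, if_pos rfl, h]
      rcases ws with _ | ⟨w2, ws'⟩ <;> simp_all [pvJoinSp]
    · simp only [pvWsplit, if_neg ha, h]
      rcases ws with _ | ⟨w2, ws'⟩ <;> simp_all [pvJoinSp]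

lemma pvGo_spec : ∀ (fuel : Nat) (l cur : List Char) (acc : List (List Char)),
    l.length < fuel →
    PySem.Chars.splitOn.go [' '] fuel l cur acc =
      acc.reverse ++ (match pvWsplit l with
        | w :: ws => (cur.reverse ++ w) :: ws
        | [] => []) := by
  intro fuel
  induction fuel with
  | zero => intro l cur acc h; exact absurd h (Nat.not_lt_zero _)
  | succ f ih =>
    intro l cur acc h
    rcases l with _ | ⟨c, rest⟩
    · have hgo : PySem.Chars.splitOn.go [' '] (f + 1) [] cur acc =
          (cur.reverse :: acc).reverse := by
        rw [PySem.Chars.splitOn.go]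
        omega
      rw [hgo]
      simp [pvWsplit]
    · obtain ⟨w0, ws, hw⟩ : ∃ w0 ws, pvWsplit rest = w0 :: ws := by
        rcases e : pvWsplit rest with _ | ⟨w0, ws⟩
        · exact absurd e (pvWsplit_ne_nil rest)
        · exact ⟨_, _, rfl⟩
      have hrest : rest.length < f := by simp at h; omega
      have hgo : PySem.Chars.splitOn.go [' '] (f + 1) (c :: rest) cur acc =
          (if [' '].isPrefixOf (c :: rest)
           then PySem.Chars.splitOn.go [' '] f (List.drop [' '].length (c :: rest)) []
                  (cur.reverse :: acc)
           else PySem.Chars.splitOn.go [' '] f rest (c :: cur) acc) := by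
        rw [PySem.Chars.splitOn.go]
      rw [hgo]
      by_cases hc : c = ' '
      · subst hc
        rw [if_pos (by simp [List.isPrefixOf])]
        simp only [List.length_singleton, List.drop_succ_cons, List.drop_zero]
        rw [ih rest [] (cur.reverse :: acc) hrest, hw]
        simp [pvWsplit, hw]
      · rw [if_neg (by simp [List.isPrefixOf]; exact fun e => hc e.symm)]
        rw [ih rest (c :: cur) acc hrest, hw]
        simp only [pvWsplit, if_neg hc, hw]
        simp

lemma pvSplitOn_eq (cs : List Char) : PySem.Chars.splitOn cs [' '] = pvWsplit cs := by
  rw [PySem.Chars.splitOn, pvGo_spec (cs.length + 1) cs [] [] (by omega)]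
  obtain ⟨w0, ws, hw⟩ : ∃ w0 ws, pvWsplit cs = w0 :: ws := by
    rcases e : pvWsplit cs with _ | ⟨w0, ws⟩
    · exact absurd e (pvWsplit_ne_nil cs)
    · exact ⟨_, _, rfl⟩
  rw [hw]
  simp

lemma pvBscan_space_cons (r : List Char) (i : Int) : pvBscan (' ' :: r) i = pvBscan r (i + 1) := by
  rcases r with _ | ⟨x, t⟩
  · simp [pvBscan]
  · rcases t with _ | ⟨y, t2⟩
    · simp [pvBscan]
    · simp [pvBscan]

lemma pvBscan_nospace (w : List Char) : ∀ i, ' ' ∉ w → pvBscan w i = pvAtri w i := by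
  induction w with
  | nil => intro i _; simp [pvBscan, pvAtri]
  | cons a w' ih =>
    intro i h
    rcases w' with _ | ⟨b, w''⟩
    · simp [pvBscan, pvAtri]
    · rcases w'' with _ | ⟨c, t⟩
      · simp [pvBscan, pvAtri]
      · have hcond : ' ' ∉ [a, b, c] := by
          simp only [List.mem_cons, not_or] at h ⊢
          exact ⟨h.1, h.2.1, h.2.2.1, by simp⟩
        rw [pvBscan, pvAtri, if_neg hcond]
        have := ih (i + 1) (fun hm => h (List.mem_cons_of_mem _ hm))
        simp [this]

lemma pvBscan_word (w : List Char) : ∀ (r : List Char) (i : Int), ' ' ∉ w →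
    pvBscan (w ++ ' ' :: r) i = pvAtri w i ++ pvBscan r (i + w.length + 1) := by
  induction w with
  | nil =>
    intro r i _
    simp [pvBscan_space_cons, pvAtri]
  | cons a w' ih =>
    intro r i h
    have ha : a ≠ ' ' := fun e => h (by simp [e])
    have h' : ' ' ∉ w' := fun hm => h (List.mem_cons_of_mem _ hm)
    rcases w' with _ | ⟨b, w''⟩
    · -- w = [a]
      simp only [List.cons_append, List.nil_append]
      rcases r with _ | ⟨x, t⟩
      · simp [pvBscan, pvAtri]
      · have hstep : pvBscan (a :: ' ' :: x :: t) i =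
            ([] : List (String × Int)) ++ pvBscan (' ' :: x :: t) (i + 1) := by
          rw [pvBscan, if_pos (by simp)]
        rw [hstep, pvBscan_space_cons]
        simp only [pvAtri, List.nil_append, List.length_cons, List.length_nil]
        norm_num
    · rcases w'' with _ | ⟨c, t⟩
      · -- w = [a, b]
        simp only [List.cons_append, List.nil_append]
        have hstep : pvBscan (a :: b :: ' ' :: r) i =
            ([] : List (String × Int)) ++ pvBscan (b :: ' ' :: r) (i + 1) := by
          rw [pvBscan, if_pos (by simp)]
        rw [hstep]
        have hb := ih r (i + 1) h'
        simp only [List.cons_append, List.nil_append] at hb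
        rw [hb]
        simp only [pvAtri, List.nil_append, List.length_cons, List.length_nil]
        congr 1
        push_cast
        ring
      · -- w = a :: b :: c :: t
        have hcond : ' ' ∉ [a, b, c] := by
          simp only [List.mem_cons, not_or] at h ⊢
          exact ⟨h.1, h.2.1, h.2.2.1, by simp⟩
        simp only [List.cons_append]
        have hstep : pvBscan (a :: b :: c :: (t ++ ' ' :: r)) i =
            [(String.ofList [a, b, c], i)] ++ pvBscan (b :: c :: (t ++ ' ' :: r)) (i + 1) := by
          rw [pvBscan, if_neg hcond]
        rw [hstep]
        have hb := ih r (i + 1) h'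
        simp only [List.cons_append] at hb
        rw [hb]
        simp only [pvAtri, List.singleton_append, List.cons_append,
          List.append_assoc, List.length_cons]
        have hoff : i + 1 + ((t.length + 1 + 1 : Nat) : Int) + 1 =
            i + ((t.length + 1 + 1 + 1 : Nat) : Int) + 1 := by push_cast; ring
        rw [hoff]
        simp

lemma pvAfold_eq_bscan : ∀ (ws : List (List Char)) (off : Int), ws ≠ [] → (∀ w ∈ ws, ' ' ∉ w) →
    pvAfold ws off = pvBscan (pvJoinSp ws) off := by
  intro ws
  induction ws with
  | nil => intro off h _; exact absurd rfl h
  | cons w ws ih =>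
    intro off _ hns
    rcases ws with _ | ⟨w2, ws'⟩
    · show pvAtri w off ++ pvAfold [] _ = pvBscan (pvJoinSp [w]) off
      simp only [pvAfold, pvJoinSp, List.append_nil]
      exact (pvBscan_nospace w off (hns w (by simp))).symm
    · show pvAtri w off ++ pvAfold (w2 :: ws') (off + w.length + 1) =
        pvBscan (w ++ ' ' :: pvJoinSp (w2 :: ws')) off
      rw [pvBscan_word w _ off (hns w (by simp)),
        ih _ (by simp) (fun x hx => hns x (by simp [hx]))]

lemma pvAtri_eq_range : ∀ (w : List Char) (off : Int),
    pvAtri w off = (List.range (w.length - 2)).map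
      (fun x => (String.ofList ((w.drop x).take 3), off + (x : Int))) := by
  intro w
  induction w with
  | nil => intro off; simp [pvAtri]
  | cons a w' ih =>
    intro off
    rcases w' with _ | ⟨b, w''⟩
    · simp [pvAtri]
    · rcases w'' with _ | ⟨c, t⟩
      · simp [pvAtri]
      · have hlen : (a :: b :: c :: t).length - 2 = t.length + 1 := by simp
        rw [pvAtri, hlen, List.range_succ_eq_map, List.map_cons, List.map_map, ih (off + 1)]
        have hlen2 : (b :: c :: t).length - 2 = t.length := by simp
        simp only [List.cons.injEq]
        refine ⟨by simp, ?_⟩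
        rw [hlen2]
        apply List.map_congr_left
        intro x _
        simp only [Function.comp_apply, Nat.succ_eq_add_one, List.drop_succ_cons,
          Prod.mk.injEq, true_and]
        push_cast; ring

lemma pvBscan_eq_range : ∀ (cs : List Char) (i : Int),
    pvBscan cs i = ((List.range (cs.length - 2)).filter
        (fun j => !decide (' ' ∈ (cs.drop j).take 3))).map
      (fun j => (String.ofList ((cs.drop j).take 3), i + (j : Int))) := by
  intro cs
  induction cs with
  | nil => intro i; simp [pvBscan]
  | cons a w' ih =>
    intro i
    rcases w' with _ | ⟨b, w''⟩
    · simp [pvBscan]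
    · rcases w'' with _ | ⟨c, t⟩
      · simp [pvBscan]
      · have hlen : (a :: b :: c :: t).length - 2 = t.length + 1 := by simp
        have hlen2 : (b :: c :: t).length - 2 = t.length := by simp
        have htail : ((List.range t.length).map Nat.succ).filter
              (fun j => !decide (' ' ∈ ((a :: b :: c :: t).drop j).take 3)) =
            ((List.range t.length).filter
              (fun j => !decide (' ' ∈ ((b :: c :: t).drop j).take 3))).map Nat.succ := by
          rw [List.filter_map]
          congr 1
        have hmap : ∀ (l : List Nat), (l.map Nat.succ).map
              (fun j => (String.ofList (((a :: b :: c :: t).drop j).take 3), i + (j : Int))) =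
            l.map (fun j => (String.ofList (((b :: c :: t).drop j).take 3), (i + 1) + (j : Int))) := by
          intro l
          rw [List.map_map]
          apply List.map_congr_left
          intro x _
          simp only [Function.comp_apply, Nat.succ_eq_add_one, List.drop_succ_cons,
            Prod.mk.injEq, true_and]
          push_cast; ring
        rw [pvBscan, hlen, List.range_succ_eq_map, ih (i + 1), hlen2]
        by_cases hsp : ' ' ∈ [a, b, c]
        · rw [if_pos hsp, List.filter_cons_of_neg (by simp [hsp]), htail, hmap]
          simp
        · rw [if_neg hsp, List.filter_cons_of_pos (by simp [hsp]), List.map_cons, htail, hmap]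
          simp

lemma pvStrSlice (s : String) (k : Nat) :
    PySem.Str.slice s (some ((k : Int))) (some ((k : Int) + 3)) =
      String.ofList ((s.toList.drop k).take 3) := by
  rw [PySem.Str.slice, PySem.Chars.slice, show (3 : Int) = ((3 : Nat) : Int) from rfl,
    PySem.List.slice_natCast_add]

lemma pvIsIn (t : String) : PySem.Str.isIn " " t = decide (' ' ∈ t.toList) := by
  rw [Bool.eq_iff_iff]
  simp only [PySem.Str.isIn_iff_infix, show (" " : String).toList = [' '] by decide,
    List.singleton_infix_iff, decide_eq_true_eq]

lemma pvInner (w : List Char) (off : Int) :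
    (PySem.List.pyRange 0 (PySem.Str.len (String.ofList w) - 2) 1).map
      (fun x => (PySem.Str.slice (String.ofList w) (some x) (some (x + 3)), off + x)) =
    pvAtri w off := by
  rw [pvAtri_eq_range,
    show PySem.Str.len (String.ofList w) = (w.length : Int) by
      rw [PySem.Str.len, String.toList_ofList],
    PySem.List.pyRange_one,
    show ((w.length : Int) - 2 - 0).toNat = w.length - 2 by omega, List.map_map]
  apply List.map_congr_left
  intro k _
  simp only [Function.comp_apply, zero_add, pvStrSlice, String.toList_ofList]

lemma pvAfold_bridge : ∀ (ws : List (List Char)) (res : List (String × Int)) (off : Int),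
    ((ws.map String.ofList).foldl
      (fun (st : List (String × Int) × Int) word =>
        (st.1 ++ (PySem.List.pyRange 0 (PySem.Str.len word - 2) 1).map
            (fun x => (PySem.Str.slice word (some x) (some (x + 3)), st.2 + x)),
         st.2 + PySem.Str.len word + 1)) (res, off)).1 = res ++ pvAfold ws off := by
  intro ws
  induction ws with
  | nil => intro res off; simp [pvAfold]
  | cons w ws ih =>
    intro res off
    rw [List.map_cons, List.foldl_cons, ih, pvInner w off, pvAfold,
      show PySem.Str.len (String.ofList w) = (w.length : Int) by
        rw [PySem.Str.len, String.toList_ofList]]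
    simp [List.append_assoc]

lemma pvA_eq (s : String) : trigrams_split s = pvAfold (pvWsplit s.toList) 0 := by
  show ((((PySem.Chars.splitOn s.toList [' ']).map String.ofList).foldl _ ([], 0)).1 : List (String × Int)) = _
  rw [pvSplitOn_eq, pvAfold_bridge]
  simp

lemma pvB_eq (s : String) : trigrams_split_alt s = pvBscan s.toList 0 := by
  unfold trigrams_split_alt
  rw [pvBscan_eq_range,
    show PySem.Str.len s = (s.toList.length : Int) from rfl,
    PySem.List.pyRange_one,
    show ((s.toList.length : Int) - 2 - 0).toNat = s.toList.length - 2 by omega,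
    List.filter_map, List.map_map]
  have hp : ((fun i => !(PySem.Str.isIn " " (PySem.Str.slice s (some i) (some (i + 3))))) ∘
        (fun k : Nat => (0 : Int) + (k : Int))) =
      (fun j : Nat => !decide (' ' ∈ (s.toList.drop j).take 3)) := by
    funext k
    simp only [Function.comp_apply, zero_add, pvIsIn, pvStrSlice, String.toList_ofList]
  rw [hp]
  apply List.map_congr_left
  intro k _
  simp only [Function.comp_apply, zero_add, pvStrSlice, String.toList_ofList]

-- ===== VERDICT (by name: the statement is the Claim_ definition above) =====
theorem trigrams_split_spec : Claim_equal_trigrams_split := by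
  intro s _
  unfold Spec_trigrams_split
  rw [pvA_eq, pvB_eq,
    pvAfold_eq_bscan _ _ (pvWsplit_ne_nil _) (pvWsplit_nospace _),
    pvJoinSp_pvWsplit]
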